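-- pv_equiv track=rewrite | github.com/valITino/blhackbox | blhackbox/utils/catalog.py | resolve_tool_names
-- ===== SOURCE A (Python) =====
-- from typing import Any
--
-- def resolve_tool_names(
--     catalog: list[dict[str, Any]],
--     names: list[str],
-- ) -> list[dict[str, str]]:
--     """Resolve a list of tool names (or category names) to (category, tool_name) pairs.
--
--     Accepts both exact tool names (e.g. 'nmap') and category names (e.g. 'dns'),
--     which expand to all tools in that category.
--
--     Raises ValueError if a name cannot be resolved.
--     """
--     by_tool: dict[str, dict[str, str]] = {}
--     by_category: dict[str, list[dict[str, str]]] = {}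
--     for entry in catalog:
--         key = {"category": entry["category"], "tool_name": entry["tool_name"]}
--         by_tool[entry["tool_name"]] = key
--         by_category.setdefault(entry["category"], []).append(key)
--
--     resolved: list[dict[str, str]] = []
--     seen: set[str] = set()
--
--     for name in names:
--         name_lower = name.strip().lower()
--         if name_lower in by_tool:
--             tool_key = f"{by_tool[name_lower]['category']}/{by_tool[name_lower]['tool_name']}"
--             if tool_key not in seen:
--                 resolved.append(by_tool[name_lower])
--                 seen.add(tool_key)
--         elif name_lower in by_category:
--             for entry in by_category[name_lower]:
--                 tool_key = f"{entry['category']}/{entry['tool_name']}"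
--                 if tool_key not in seen:
--                     resolved.append(entry)
--                     seen.add(tool_key)
--         else:
--             raise ValueError(
--                 f"Unknown tool or category: {name!r}. "
--                 f"Run 'blhackbox catalog' to see available tools."
--             )
--
--     return resolved
-- ===== SOURCE B (Python) =====
-- def resolve_tool_names(
--     catalog,
--     names,
-- ):
--     """Index-free resolution: each name is resolved by scanning the catalog
--     directly (last matching tool wins, mirroring dict overwrite), with no
--     lookup tables built at all."""
--     resolved = []
--     seen = set()
--     for name in names:
--         name_lower = name.strip().lower()
--         tool_entry = None
--         for entry in catalog:
--             if entry["tool_name"] == name_lower: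
--                 tool_entry = entry
--         if tool_entry is not None:
--             matches = [tool_entry]
--         else:
--             matches = [e for e in catalog if e["category"] == name_lower]
--             if not matches:
--                 raise ValueError(
--                     f"Unknown tool or category: {name!r}. "
--                     f"Run 'blhackbox catalog' to see available tools."
--                 )
--         for entry in matches:
--             tool_key = f"{entry['category']}/{entry['tool_name']}"
--             if tool_key not in seen:
--                 resolved.append({"category": entry["category"], "tool_name": entry["tool_name"]})
--                 seen.add(tool_key)
--     return resolved
-- ===== Notes on version B (the rewrite author's own statement) =====
-- stated objective: alternative
-- what changed: Drops A's precomputed by_tool/by_category dicts entirely: each name is resolved by scanning the catalog directly (a last-match scan for a tool, a filter for a category), trading the prebuilt index for index-free nested passes.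
import Mathlib
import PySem

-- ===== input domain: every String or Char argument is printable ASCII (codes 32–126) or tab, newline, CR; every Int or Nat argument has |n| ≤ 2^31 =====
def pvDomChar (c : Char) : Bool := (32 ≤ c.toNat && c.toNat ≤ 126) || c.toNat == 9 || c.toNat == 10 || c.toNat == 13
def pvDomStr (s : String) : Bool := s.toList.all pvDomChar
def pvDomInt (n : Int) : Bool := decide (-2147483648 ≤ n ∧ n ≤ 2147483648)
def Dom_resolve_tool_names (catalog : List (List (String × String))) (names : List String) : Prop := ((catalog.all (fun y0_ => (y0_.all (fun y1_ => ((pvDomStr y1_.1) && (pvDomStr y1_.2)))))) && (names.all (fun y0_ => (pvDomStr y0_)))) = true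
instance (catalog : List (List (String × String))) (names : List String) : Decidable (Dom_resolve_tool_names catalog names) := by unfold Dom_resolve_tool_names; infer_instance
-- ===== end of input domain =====

-- B drops A's precomputed by_tool/by_category dicts and resolves each name by direct scans of
-- the catalog (last-match scan for tools, filter for categories); same return value on Pre_.


-- shared readers for a catalog entry (a Python dict, passed as an assoc list): entry["category"], entry["tool_name"]
def pvCatOf (e : List (String × String)) : String := (PySem.Dict.ofList e).getD "category" ""
def pvToolOf (e : List (String × String)) : String := (PySem.Dict.ofList e).getD "tool_name" ""
-- {"category": entry["category"], "tool_name": entry["tool_name"]}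
def pvKeyOf (e : List (String × String)) : List (String × String) :=
  [("category", pvCatOf e), ("tool_name", pvToolOf e)]
-- tool_key = f"{entry['category']}/{entry['tool_name']}" (computed from the key dict in A, from the entry in B; same strings)
def pvToolKey (key : List (String × String)) : String :=
  PySem.Str.join "/" [(PySem.Dict.ofList key).getD "category" "", (PySem.Dict.ofList key).getD "tool_name" ""]
-- inner body of both Pythons: append key if its tool_key is unseen
def pvStep (st : List (List (String × String)) × PySem.Set String) (key : List (String × String)) :
    List (List (String × String)) × PySem.Set String :=
  let tk := pvToolKey key
  if PySem.Set.contains st.2 tk then st else (st.1 ++ [key], PySem.Set.add st.2 tk)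

-- ===== PORT A =====
def resolve_tool_names (catalog : List (List (String × String))) (names : List String) : List (List (String × String)) :=
  let maps := catalog.foldl
    (fun (p : PySem.Dict String (List (String × String)) × PySem.Dict String (List (List (String × String)))) e =>
      let key := pvKeyOf e
      (p.1.insert (pvToolOf e) key, p.2.modify (pvCatOf e) [] (· ++ [key])))
    (PySem.Dict.empty, PySem.Dict.empty)
  let r := names.foldl
    (fun st name =>
      let nl := PySem.Str.lower (PySem.Str.strip name)
      match maps.1.get? nl with
      | some key => pvStep st key
      | none =>
        match maps.2.get? nl with
        | some entries => entries.foldl pvStep st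
        | none => st)  -- Python raises ValueError here: excluded by Pre_
    ([], PySem.Set.empty)
  r.1

-- ===== PORT B =====
def resolve_tool_names_alt (catalog : List (List (String × String))) (names : List String) : List (List (String × String)) :=
  let r := names.foldl
    (fun st name =>
      let nl := PySem.Str.lower (PySem.Str.strip name)
      -- for entry in catalog: if entry["tool_name"] == name_lower: tool_entry = entry
      let toolEntry := catalog.foldl
        (fun (acc : Option (List (String × String))) e => if pvToolOf e == nl then some e else acc) none
      let matched := match toolEntry with
        | some e => [e]
        | none => catalog.filter (fun e => pvCatOf e == nl)  -- [] ⇒ Python raises ValueError: excluded by Pre_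
      matched.foldl (fun st e => pvStep st (pvKeyOf e)) st)
    ([], PySem.Set.empty)
  r.1

-- ===== PRECONDITION & SPEC =====
-- Pre_ excludes exactly the inputs where the Python raises: an entry missing the "category" or
-- "tool_name" key (KeyError) or a name resolving to neither a tool nor a category (ValueError).
def Pre_resolve_tool_names (catalog : List (List (String × String))) (names : List String) : Prop :=
  (∀ e ∈ catalog, (PySem.Dict.ofList e).contains "category" = true ∧ (PySem.Dict.ofList e).contains "tool_name" = true) ∧
  (∀ n ∈ names, ∃ e ∈ catalog,
    pvToolOf e = PySem.Str.lower (PySem.Str.strip n) ∨ pvCatOf e = PySem.Str.lower (PySem.Str.strip n))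
instance (catalog : List (List (String × String))) (names : List String) : Decidable (Pre_resolve_tool_names catalog names) := by unfold Pre_resolve_tool_names; infer_instance
def pvWitness_resolve_tool_names : (List (List (String × String))) × List String :=
  ([[("category", "dns"), ("tool_name", "nmap")], [("category", "web"), ("tool_name", "ffuf")]],
   ["NMAP ", "web", "dns"])
def Spec_resolve_tool_names (catalog : List (List (String × String))) (names : List String) (out : List (List (String × String))) : Prop := out = resolve_tool_names_alt catalog names
instance (catalog : List (List (String × String))) (names : List String) (out : List (List (String × String))) : Decidable (Spec_resolve_tool_names catalog names out) := by unfold Spec_resolve_tool_names; infer_instance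

-- ===== CLAIM (what is proved, stated in full; the proofs are below) =====
def Claim_equal_resolve_tool_names : Prop := ∀ (catalog : List (List (String × String))) (names : List String), Dom_resolve_tool_names catalog names → Pre_resolve_tool_names catalog names → Spec_resolve_tool_names catalog names (resolve_tool_names catalog names)

-- ===== LEMMAS AND PROOFS =====

-- A's single loop over the catalog with two independent dict accumulators is the two separate folds.
lemma pvMapsA_eq (catalog : List (List (String × String))) :
    catalog.foldl
      (fun (p : PySem.Dict String (List (String × String)) × PySem.Dict String (List (List (String × String)))) e =>
        (p.1.insert (pvToolOf e) (pvKeyOf e), p.2.modify (pvCatOf e) [] (· ++ [pvKeyOf e])))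
      (PySem.Dict.empty, PySem.Dict.empty)
    = (catalog.foldl (fun d e => d.insert (pvToolOf e) (pvKeyOf e)) PySem.Dict.empty,
       catalog.foldl (fun d e => d.modify (pvCatOf e) [] (· ++ [pvKeyOf e])) PySem.Dict.empty) := by
  rw [PySem.List.foldl_prod_mk
    (f := fun d e => PySem.Dict.insert d (pvToolOf e) (pvKeyOf e))
    (g := fun d e => PySem.Dict.modify d (pvCatOf e) [] (· ++ [pvKeyOf e]))]

-- lookup in a fold of inserts = last matching entry
lemma pvGet_foldl_insert {α : Type} (v : List (String × String) → α) (l : List (List (String × String)))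
    (d0 : PySem.Dict String α) (s : String) :
    (l.foldl (fun d e => d.insert (pvToolOf e) (v e)) d0).get? s
      = match (l.reverse.find? (fun e => pvToolOf e == s)) with
        | some e => some (v e)
        | none => d0.get? s := by
  induction l generalizing d0 with
  | nil => simp
  | cons e t ih =>
    simp only [List.foldl_cons, List.reverse_cons, List.find?_append, ih]
    cases h : t.reverse.find? (fun e => pvToolOf e == s) with
    | some e' => simp
    | none =>
      simp only [Option.none_or]
      by_cases hs : pvToolOf e = s
      · subst hs; simp [PySem.Dict.get?_insert_self]
      · have hb : (pvToolOf e == s) = false := beq_eq_false_iff_ne.mpr hs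
        simp [List.find?, hb, PySem.Dict.get?_insert_of_ne _ _ (Ne.symm hs)]

-- B's keep-last scan of the catalog is the same last-match
lemma pvFoldl_last_scan (l : List (List (String × String))) (s : String)
    (a0 : Option (List (String × String))) :
    l.foldl (fun acc e => if pvToolOf e == s then some e else acc) a0
      = match l.reverse.find? (fun e => pvToolOf e == s) with
        | some e => some e
        | none => a0 := by
  induction l generalizing a0 with
  | nil => simp
  | cons e t ih =>
    simp only [List.foldl_cons, List.reverse_cons, List.find?_append, ih]
    cases h : t.reverse.find? (fun e => pvToolOf e == s) with
    | some e' => simp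
    | none =>
      simp only [Option.none_or]
      by_cases hs : (pvToolOf e == s) = true <;> simp [List.find?, hs]

-- A's category dict answers the filtered catalog (or is absent when no entry matched)
lemma pvCatDict_get (catalog : List (List (String × String))) (s : String) :
    (catalog.foldl (fun d e => d.modify (pvCatOf e) [] (· ++ [pvKeyOf e])) PySem.Dict.empty).get? s
      = if (catalog.filter (fun e => pvCatOf e == s)) = []
        then none
        else some ((catalog.filter (fun e => pvCatOf e == s)).map pvKeyOf) := by
  have hfold : catalog.foldl (fun d e => d.modify (pvCatOf e) [] (· ++ [pvKeyOf e])) PySem.Dict.empty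
      = (catalog.map (fun e => (pvCatOf e, pvKeyOf e))).foldl
          (fun d p => d.modify p.1 [] (· ++ [p.2])) PySem.Dict.empty := by
    rw [List.foldl_map]
  have hgetD := PySem.Dict.getD_foldl_modify_append
    (l := catalog.map (fun e => (pvCatOf e, pvKeyOf e))) (d := PySem.Dict.empty) (c := s)
  have hkeys : (catalog.foldl (fun d e => d.modify (pvCatOf e) [] (· ++ [pvKeyOf e])) PySem.Dict.empty).keys
      = PySem.Set.update PySem.Dict.empty.keys (catalog.map pvCatOf) :=
    PySem.Dict.keys_foldl_modify_key (key := pvCatOf) (l := catalog)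
      (f := fun _ e => (· ++ [pvKeyOf e])) (d := PySem.Dict.empty) (d0 := [])
  have hfilter : (catalog.map (fun e => (pvCatOf e, pvKeyOf e))).filter (fun p => p.1 == s)
      = (catalog.filter (fun e => pvCatOf e == s)).map (fun e => (pvCatOf e, pvKeyOf e)) := by
    rw [List.filter_map]; rfl
  have hmem : ∀ x, x ∈ PySem.Set.update (PySem.Dict.empty : PySem.Dict String (List (List (String × String)))).keys (catalog.map pvCatOf) ↔ x ∈ catalog.map pvCatOf := by
    intro x
    simp [PySem.Dict.keys_empty, PySem.Set.update_nil_left, PySem.Set.mem_ofList]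
  cases hg : (catalog.foldl (fun d e => d.modify (pvCatOf e) [] (· ++ [pvKeyOf e])) PySem.Dict.empty).get? s with
  | none =>
    have hc : (catalog.foldl (fun d e => d.modify (pvCatOf e) [] (· ++ [pvKeyOf e])) PySem.Dict.empty).contains s = false := by
      rw [PySem.Dict.contains_eq_isSome_get?, hg]; rfl
    have hnot : s ∉ catalog.map pvCatOf := by
      intro hmem'
      have := (PySem.Dict.contains_iff_mem_keys _ _).mpr (by rw [hkeys]; exact (hmem s).mpr hmem')
      rw [hc] at this; exact Bool.false_ne_true this
    have hfe : catalog.filter (fun e => pvCatOf e == s) = [] := by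
      rw [List.filter_eq_nil_iff]
      intro e he hbe
      exact hnot (List.mem_map.mpr ⟨e, he, eq_of_beq hbe⟩)
    simp [hfe]
  | some v =>
    have hv : v = (catalog.filter (fun e => pvCatOf e == s)).map pvKeyOf := by
      have h2 : ((catalog.map (fun e => (pvCatOf e, pvKeyOf e))).foldl
          (fun d p => d.modify p.1 [] (· ++ [p.2])) PySem.Dict.empty).getD s [] = v := by
        rw [← hfold, PySem.Dict.getD_eq_get?_getD, hg]; rfl
      rw [hgetD, hfilter, PySem.Dict.getD_empty, List.nil_append, List.map_map] at h2
      rw [← h2]; rfl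
    have hc : (catalog.foldl (fun d e => d.modify (pvCatOf e) [] (· ++ [pvKeyOf e])) PySem.Dict.empty).contains s = true := by
      rw [PySem.Dict.contains_eq_isSome_get?, hg]; rfl
    have hmem' : s ∈ catalog.map pvCatOf :=
      (hmem s).mp (by rw [← hkeys]; exact (PySem.Dict.contains_iff_mem_keys _ _).mp hc)
    have hne : catalog.filter (fun e => pvCatOf e == s) ≠ [] := by
      obtain ⟨e, he, heq⟩ := List.mem_map.mp hmem'
      intro hnil
      have : e ∈ catalog.filter (fun e => pvCatOf e == s) :=
        List.mem_filter.mpr ⟨he, beq_iff_eq.mpr heq⟩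
      rw [hnil] at this; exact (List.not_mem_nil) this
    simp [hne, hv]

-- ===== VERDICT (by name: the statement is the Claim_ definition above) =====
theorem resolve_tool_names_spec : Claim_equal_resolve_tool_names := by
  intro catalog names _ _
  unfold Spec_resolve_tool_names
  simp only [resolve_tool_names, resolve_tool_names_alt, pvMapsA_eq]
  congr 1
  apply PySem.List.foldl_congr_mem
  intro st name _
  rw [pvGet_foldl_insert (v := fun e => pvKeyOf e), pvFoldl_last_scan, pvCatDict_get]
  cases h : catalog.reverse.find? (fun e => pvToolOf e == PySem.Str.lower (PySem.Str.strip name)) with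
  | some e => simp [List.foldl]
  | none =>
    simp only
    by_cases hf : (catalog.filter (fun e => pvCatOf e == PySem.Str.lower (PySem.Str.strip name))) = []
    · simp [hf]
    · simp only [PySem.Dict.get?_empty]
      rw [if_neg hf]
      simp only [List.foldl_map]
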